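-- pv_equiv track=rewrite | github.com/SanjaySubramanian1605/python-loops-assignment | grade_analyzer.py | classify_grades
-- ===== SOURCE A (Python) =====
-- def classify_grades(averages):
--   result = {}
--
--   for name, avg in averages.items():
--     if avg >= 90:
--       result[name] =(avg,"A")
--     elif avg >= 80:
--       result[name] =(avg,"B")
--     elif avg >= 70:
--       result[name] =(avg,"C")
--     elif avg >= 60:
--       result[name] =(avg,"D")
--     else:
--       result[name] =(avg,"F")
--   return result
-- ===== SOURCE B (Python) =====
-- def classify_grades(averages):
--     thresholds = [60, 70, 80, 90]
--     letters = ["F", "D", "C", "B", "A"]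
--
--     def cutoff_index(x):
--         lo, hi = 0, len(thresholds)
--         while lo < hi:
--             mid = (lo + hi) // 2
--             if x < thresholds[mid]:
--                 hi = mid
--             else:
--                 lo = mid + 1
--         return lo
--
--     return {name: (avg, letters[cutoff_index(avg)]) for name, avg in averages.items()}
-- ===== Notes on version B (the rewrite author's own statement) =====
-- stated objective: alternative
-- what changed: Replaces the five-way if/elif threshold cascade with a table of cutoffs plus a hand-written bisect_right binary search, and builds the result as a single dict comprehension instead of imperative insertions.
import Mathlib
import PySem

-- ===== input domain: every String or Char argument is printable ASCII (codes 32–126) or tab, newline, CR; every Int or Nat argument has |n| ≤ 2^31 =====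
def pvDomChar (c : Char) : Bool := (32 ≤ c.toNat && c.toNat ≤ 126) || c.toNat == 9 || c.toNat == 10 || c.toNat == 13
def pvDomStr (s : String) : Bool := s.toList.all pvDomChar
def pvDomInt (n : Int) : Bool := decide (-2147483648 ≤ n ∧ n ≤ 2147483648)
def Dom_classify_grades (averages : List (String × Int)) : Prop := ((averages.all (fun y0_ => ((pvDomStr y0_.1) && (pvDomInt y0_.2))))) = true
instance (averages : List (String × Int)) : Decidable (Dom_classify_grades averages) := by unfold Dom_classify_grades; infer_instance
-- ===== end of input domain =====

-- B replaces A's if/elif threshold cascade by a cutoff table searched with a hand-written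
-- bisect_right loop and builds the result dict as a comprehension; alternative, not faster.

-- ===== PORT A =====
-- A iterates over the items of its dict argument (modelled as PySem.Dict.ofList of the
-- association list) and inserts (avg, letter) chosen by the if/elif cascade.
def classify_grades (averages : List (String × Int)) : List (String × Int × String) :=
  let result :=
    (PySem.Dict.ofList averages).items.foldl
      (fun (r : PySem.Dict String (Int × String)) p =>
        if p.2 ≥ 90 then r.insert p.1 (p.2, "A")
        else if p.2 ≥ 80 then r.insert p.1 (p.2, "B")
        else if p.2 ≥ 70 then r.insert p.1 (p.2, "C")
        else if p.2 ≥ 60 then r.insert p.1 (p.2, "D")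
        else r.insert p.1 (p.2, "F"))
      PySem.Dict.empty
  result.items

-- ===== PORT B =====
-- the while lo < hi binary-search loop of Source B's cutoff_index, recursion on hi - lo
def pvBisectLoop (ts : List Int) (x : Int) (lo hi : Nat) : Nat :=
  if h : lo < hi then
    let mid := (lo + hi) / 2
    if x < ts.getD mid 0 then pvBisectLoop ts x lo mid
    else pvBisectLoop ts x (mid + 1) hi
  else lo
termination_by hi - lo
decreasing_by all_goals omega

-- the dict comprehension over .items(): keys of a dict's items are distinct, so the
-- comprehension is exactly this map (no overwriting can occur)
def classify_grades_alt (averages : List (String × Int)) : List (String × Int × String) :=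
  let thresholds : List Int := [60, 70, 80, 90]
  let letters : List String := ["F", "D", "C", "B", "A"]
  (PySem.Dict.ofList averages).items.map
    (fun p => (p.1, p.2, letters.getD (pvBisectLoop thresholds p.2 0 thresholds.length) "F"))

-- ===== PRECONDITION & SPEC =====
def Spec_classify_grades (averages : List (String × Int)) (out : List (String × Int × String)) : Prop := out = classify_grades_alt averages
instance (averages : List (String × Int)) (out : List (String × Int × String)) : Decidable (Spec_classify_grades averages out) := by unfold Spec_classify_grades; infer_instance

-- ===== CLAIM (what is proved, stated in full; the proofs are below) =====
def Claim_equal_classify_grades : Prop := ∀ (averages : List (String × Int)), Dom_classify_grades averages → Spec_classify_grades averages (classify_grades averages)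

-- ===== LEMMAS AND PROOFS =====

-- A's cascade letter for one average
def pvCascade (x : Int) : String :=
  if x ≥ 90 then "A" else if x ≥ 80 then "B" else if x ≥ 70 then "C"
  else if x ≥ 60 then "D" else "F"

theorem pvBisect_eq_cascade (x : Int) :
    ["F", "D", "C", "B", "A"].getD (pvBisectLoop [60, 70, 80, 90] x 0 4) "F" = pvCascade x := by
  by_cases h90 : x ≥ 90
  · simp [pvCascade, pvBisectLoop, h90, show ¬ x < 90 by omega, show ¬ x < 80 by omega]
  · by_cases h80 : x ≥ 80
    · simp [pvCascade, pvBisectLoop, h90, h80, show x < 90 by omega, show ¬ x < 80 by omega]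
    · by_cases h70 : x ≥ 70
      · simp [pvCascade, pvBisectLoop, h90, h80, h70, show x < 80 by omega,
          show ¬ x < 70 by omega]
      · by_cases h60 : x ≥ 60
        · simp [pvCascade, pvBisectLoop, h90, h80, h70, h60, show x < 80 by omega,
            show x < 70 by omega, show ¬ x < 60 by omega]
        · simp [pvCascade, pvBisectLoop, h90, h80, h70, h60, show x < 80 by omega,
            show x < 70 by omega, show x < 60 by omega]

theorem pvFold_eq (l : List (String × Int)) (h : (l.map Prod.fst).Nodup) :
    (l.foldl
      (fun (r : PySem.Dict String (Int × String)) p =>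
        if p.2 ≥ 90 then r.insert p.1 (p.2, "A")
        else if p.2 ≥ 80 then r.insert p.1 (p.2, "B")
        else if p.2 ≥ 70 then r.insert p.1 (p.2, "C")
        else if p.2 ≥ 60 then r.insert p.1 (p.2, "D")
        else r.insert p.1 (p.2, "F"))
      PySem.Dict.empty).items
    = l.map (fun p => (p.1, p.2, pvCascade p.2)) := by
  have hbody : (fun (r : PySem.Dict String (Int × String)) (p : String × Int) =>
        if p.2 ≥ 90 then r.insert p.1 (p.2, "A")
        else if p.2 ≥ 80 then r.insert p.1 (p.2, "B")
        else if p.2 ≥ 70 then r.insert p.1 (p.2, "C")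
        else if p.2 ≥ 60 then r.insert p.1 (p.2, "D")
        else r.insert p.1 (p.2, "F"))
      = fun r p => r.insert p.1 (p.2, pvCascade p.2) := by
    funext r p
    unfold pvCascade
    split_ifs <;> rfl
  rw [hbody,
    PySem.Dict.items_foldl_insert_fresh l Prod.fst (fun p => (p.2, pvCascade p.2))
      PySem.Dict.empty (fun a _ => PySem.Dict.contains_empty _) h]
  simp [PySem.Dict.empty]

-- ===== VERDICT (by name: the statement is the Claim_ definition above) =====
theorem classify_grades_spec : Claim_equal_classify_grades := by
  intro averages _
  unfold Spec_classify_grades classify_grades classify_grades_alt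
  rw [pvFold_eq _ (PySem.Dict.nodup_keys_ofList averages)]
  refine List.map_congr_left (fun p _ => ?_)
  rw [show ([60, 70, 80, 90] : List Int).length = 4 from rfl, pvBisect_eq_cascade]
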